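-- pv_equiv track=rewrite | github.com/XMK233/Leetcode-Journey | py-Jindian/17.23.py | findSquare_ref
-- ===== SOURCE A (Python) =====
-- from collections import defaultdict
--
-- def findSquare_ref(matrix):
--     ### 这是参考的方法.
--     if not matrix:
--         return []
--     mxHorizontal = defaultdict(int)
--     mxVertical = defaultdict(int)
--     rows, cols = len(matrix), len(matrix[0])
--     res = []
--     ## 这里的两重循环是通过动态规划的思维来填充两个defaultdict.
--     ## 这俩dict有什么用呢: 记载了从(r,c)这个点开始, 往右或者往下最长的黑边分别有多长.
--     ## 注意啊, 这里两个dict相当于是反着填充的, 你看到没, 方阵是反着遍历的.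
--     for r in range(rows)[::-1]:
--         for c in range(cols)[::-1]:
--             if matrix[r][c] == 0:
--                 mxHorizontal[r, c] = 1 + mxHorizontal[r, c + 1]
--                 mxVertical[r, c] = 1 + mxVertical[r + 1, c]
--     ## 然后就是正着遍历方阵.
--     for r in range(rows):
--         for c in range(cols):
--             if matrix[r][c] == 0:
--                 mxsize = min(mxHorizontal[r, c], mxVertical[r, c])
--                 cursize = 0 if not res else res[2]
--                 for size in range(mxsize, cursize, -1):
--                     if mxVertical[r, c + size - 1] >= size and mxHorizontal[r + size - 1, c] >= size:
--                         ## 这个if语句是什么意思? 我想了蛮久的，终于给我想出来了。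
--                         ### 从(r, c)出发, 往右和往下最长的黑边, 为mxsize. 这两个方向是确定OK的。
--                         ### 那么, 当我们确定了(r,c)也就是左上角OK了, 是不是要进一步确认一下右上角(r, c + size - 1)往下、以及
--                         ### 左下角（r + size - 1, c）往右也符合规定？
--                         ### 这就是这个if语句的用意。
--                         ### 而且这个if语句是从mxsize开始倒着遍历的。也就是从最大的可能边长开始倒着遍历。
--                         ### 如果mxsize比cursize小，那就不遍历了。
--                         res = [r, c, size]
--                         break
--     return res
-- ===== SOURCE B (Python) =====
-- def findSquare_ref(matrix):
--     # Alternative decomposition: size-outer search (largest side first), position-inner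
--     # row-major scan, direct O(s) border checks; first hit is the answer.
--     if not matrix:
--         return []
--     rows, cols = len(matrix), len(matrix[0])
--     for s in range(min(rows, cols), 0, -1):
--         for r in range(rows - s + 1):
--             for c in range(cols - s + 1):
--                 if (all(matrix[r][c + k] == 0 for k in range(s))
--                         and all(matrix[r + s - 1][c + k] == 0 for k in range(s))
--                         and all(matrix[r + k][c] == 0 for k in range(s))
--                         and all(matrix[r + k][c + s - 1] == 0 for k in range(s))):
--                     return [r, c, s]
--     return []
-- ===== Notes on version B (the rewrite author's own statement) =====
-- stated objective: alternative
-- what changed: Replaces A's run-length DP dictionaries plus cell-outer scan with inner descending size loop by a size-outer (largest first), position-inner row-major search that checks the four borders of each candidate square directly and returns the first hit.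
import Mathlib
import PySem

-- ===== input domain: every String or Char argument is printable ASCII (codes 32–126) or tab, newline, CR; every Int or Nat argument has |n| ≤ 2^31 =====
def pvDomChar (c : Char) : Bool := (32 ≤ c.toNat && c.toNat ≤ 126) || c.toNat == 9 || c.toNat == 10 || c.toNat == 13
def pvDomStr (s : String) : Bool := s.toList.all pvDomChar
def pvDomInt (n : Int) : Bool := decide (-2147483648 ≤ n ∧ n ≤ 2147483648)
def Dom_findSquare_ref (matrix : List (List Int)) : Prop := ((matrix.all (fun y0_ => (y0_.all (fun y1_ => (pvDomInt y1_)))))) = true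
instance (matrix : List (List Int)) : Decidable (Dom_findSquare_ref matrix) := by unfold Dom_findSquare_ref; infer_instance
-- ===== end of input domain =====

-- B replaces A's run-length DP dictionaries + cell-outer scan by a size-outer, position-inner
-- direct border search (alternative decomposition, same results).


-- ===== PORT A =====
-- one step of the reversed double loop filling the two defaultdicts
def pvStepA (matrix : List (List Int)) (st : PySem.Dict (Int × Int) Int × PySem.Dict (Int × Int) Int) (r c : Int) :
    PySem.Dict (Int × Int) Int × PySem.Dict (Int × Int) Int :=
  if PySem.List.pyGetD (PySem.List.pyGetD matrix r []) c 1 = 0 then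
    (st.1.insert (r, c) (1 + st.1.getD (r, c + 1) 0),
     st.2.insert (r, c) (1 + st.2.getD (r + 1, c) 0))
  else st

-- the two defaultdicts (mxHorizontal, mxVertical) after the reversed double loop
def pvBuildA (matrix : List (List Int)) : PySem.Dict (Int × Int) Int × PySem.Dict (Int × Int) Int :=
  ((PySem.List.pyRange 0 (matrix.length : Int) 1).reverse).foldl
    (fun st r => ((PySem.List.pyRange 0 ((PySem.List.pyGetD matrix 0 []).length : Int) 1).reverse).foldl
      (fun st c => pvStepA matrix st r c) st)
    (PySem.Dict.empty, PySem.Dict.empty)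

def findSquare_ref (matrix : List (List Int)) : List Int :=
  if matrix = [] then []
  else
    let mxs := pvBuildA matrix
    (PySem.List.pyRange 0 (matrix.length : Int) 1).foldl (fun res r =>
      (PySem.List.pyRange 0 ((PySem.List.pyGetD matrix 0 []).length : Int) 1).foldl (fun res c =>
        if PySem.List.pyGetD (PySem.List.pyGetD matrix r []) c 1 = 0 then
          -- the descending inner loop with break: first size in range passing the test
          match (PySem.List.pyRange (min (mxs.1.getD (r, c) 0) (mxs.2.getD (r, c) 0))
                   (if res = [] then 0 else PySem.List.pyGetD res 2 0) (-1)).find? (fun size =>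
              size ≤ mxs.2.getD (r, c + size - 1) 0 && size ≤ mxs.1.getD (r + size - 1, c) 0) with
          | some size => [r, c, size]
          | none => res
        else res) res) []

-- ===== PORT B =====
-- the four borders of the s×s square with top-left (r,c) are entirely 0
def pvBorderOK (matrix : List (List Int)) (r c s : Int) : Bool :=
  ((PySem.List.pyRange 0 s 1).all fun k => PySem.List.pyGetD (PySem.List.pyGetD matrix r []) (c + k) 1 == 0) &&
  ((PySem.List.pyRange 0 s 1).all fun k => PySem.List.pyGetD (PySem.List.pyGetD matrix (r + s - 1) []) (c + k) 1 == 0) &&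
  ((PySem.List.pyRange 0 s 1).all fun k => PySem.List.pyGetD (PySem.List.pyGetD matrix (r + k) []) c 1 == 0) &&
  ((PySem.List.pyRange 0 s 1).all fun k => PySem.List.pyGetD (PySem.List.pyGetD matrix (r + k) []) (c + s - 1) 1 == 0)

def findSquare_ref_alt (matrix : List (List Int)) : List Int :=
  if matrix = [] then []
  else
    match (PySem.List.pyRange (min (matrix.length : Int) ((PySem.List.pyGetD matrix 0 []).length : Int)) 0 (-1)).findSome? (fun s =>
      (PySem.List.pyRange 0 ((matrix.length : Int) - s + 1) 1).findSome? (fun r =>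
        ((PySem.List.pyRange 0 (((PySem.List.pyGetD matrix 0 []).length : Int) - s + 1) 1).find? (fun c => pvBorderOK matrix r c s)).map
          (fun c => [r, c, s]))) with
    | some res => res
    | none => []

-- ===== PRECONDITION & SPEC =====
-- Pre_ excludes exactly the ragged matrices on which A raises IndexError (a row shorter than row 0).
def Pre_findSquare_ref (matrix : List (List Int)) : Prop :=
  ∀ row ∈ matrix, (matrix.headD []).length ≤ row.length
instance (matrix : List (List Int)) : Decidable (Pre_findSquare_ref matrix) := by
  unfold Pre_findSquare_ref; infer_instance
def pvWitness_findSquare_ref : List (List Int) := [[0, 1, 0], [0, 0, 0], [0, 1, 0]]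

def Spec_findSquare_ref (matrix : List (List Int)) (out : List Int) : Prop := out = findSquare_ref_alt matrix
instance (matrix : List (List Int)) (out : List Int) : Decidable (Spec_findSquare_ref matrix out) := by unfold Spec_findSquare_ref; infer_instance

-- ===== CLAIM (what is proved, stated in full; the proofs are below) =====
def Claim_equal_findSquare_ref : Prop := ∀ (matrix : List (List Int)), Dom_findSquare_ref matrix → Pre_findSquare_ref matrix → Spec_findSquare_ref matrix (findSquare_ref matrix)

-- ===== LEMMAS AND PROOFS =====

-- Abbreviations for the grid dimensions
def pvR (m : List (List Int)) : Nat := m.length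
def pvC (m : List (List Int)) : Nat := (m.headD []).length

-- length of the initial all-zero run of a list
def pvZrun : List Int → Nat
  | [] => 0
  | x :: t => if x = 0 then pvZrun t + 1 else 0

-- the cell value A's loops test, truncated to the first C columns (default 1 = "not black")
def pvCell (m : List (List Int)) (C : Nat) (r c : Int) : Int :=
  PySem.List.pyGetD ((PySem.List.pyGetD m r []).take C) c 1

-- intended content of mxHorizontal / mxVertical
def pvFh (m : List (List Int)) (C : Nat) (r c : Int) : Int :=
  if 0 ≤ r ∧ 0 ≤ c then (pvZrun (((PySem.List.pyGetD m r []).take C).drop c.toNat) : Int) else 0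

def pvColl (m : List (List Int)) (C : Nat) (c : Int) : List Int :=
  m.map (fun row => PySem.List.pyGetD (row.take C) c 1)

def pvFv (m : List (List Int)) (C : Nat) (r c : Int) : Int :=
  if 0 ≤ r ∧ 0 ≤ c then (pvZrun ((pvColl m C c).drop r.toNat) : Int) else 0

-- "the s×s square with top-left (r,c) lies in the grid and has all-black borders"
def pvValid (m : List (List Int)) (r c s : Int) : Prop :=
  0 ≤ r ∧ 0 ≤ c ∧ 1 ≤ s ∧ r + s ≤ (pvR m : Int) ∧ c + s ≤ (pvC m : Int) ∧
  ∀ k : Int, 0 ≤ k → k < s →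
    pvCell m (pvC m) r (c + k) = 0 ∧ pvCell m (pvC m) (r + s - 1) (c + k) = 0 ∧
    pvCell m (pvC m) (r + k) c = 0 ∧ pvCell m (pvC m) (r + k) (c + s - 1) = 0

def pvLexLt (p q : Int × Int) : Prop := p.1 < q.1 ∨ (p.1 = q.1 ∧ p.2 < q.2)

-- the common result specification
def pvGood (m : List (List Int)) (res : List Int) : Prop :=
  (res = [] ∧ ∀ r c s : Int, ¬ pvValid m r c s) ∨
  (∃ r c s : Int, res = [r, c, s] ∧ pvValid m r c s ∧
    (∀ r' c' s' : Int, s < s' → ¬ pvValid m r' c' s') ∧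
    (∀ r' c' : Int, pvLexLt (r', c') (r, c) → ¬ pvValid m r' c' s))

-- ---------- generic list lemmas ----------

lemma pvMem_pyRange_neg_one {a b x : Int} :
    x ∈ PySem.List.pyRange a b (-1) ↔ b < x ∧ x ≤ a := by
  rw [PySem.List.pyRange_neg_one]
  simp only [List.mem_map, List.mem_range]
  constructor
  · rintro ⟨k, hk, rfl⟩; omega
  · rintro ⟨h1, h2⟩; exact ⟨(a - x).toNat, by omega, by omega⟩


lemma pvFind_desc_some {p : Int → Bool} {a b s : Int}
    (h : (PySem.List.pyRange a b (-1)).find? p = some s) :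
    b < s ∧ s ≤ a ∧ p s = true ∧ ∀ t, s < t → t ≤ a → p t = false := by
  induction hn : (a - b).toNat generalizing a with
  | zero =>
    rw [PySem.List.pyRange_neg_one, show (a-b).toNat = 0 from hn] at h
    simp at h
  | succ n ih =>
    have hab : b < a := by omega
    rw [PySem.List.pyRange_neg_one_cons hab] at h
    rw [List.find?_cons] at h
    by_cases hp : p a
    · simp [hp] at h
      subst h
      exact ⟨hab, le_refl _, hp, fun t h1 h2 => by omega⟩
    · rw [Bool.not_eq_true] at hp
      simp only [hp] at h
      obtain ⟨h1, h2, h3, h4⟩ := ih (a := a - 1) h (by omega)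
      refine ⟨h1, by omega, h3, fun t ht1 ht2 => ?_⟩
      rcases eq_or_lt_of_le ht2 with rfl | hlt
      · exact hp
      · exact h4 t ht1 (by omega)


lemma pvFind_desc_none {p : Int → Bool} {a b : Int}
    (h : (PySem.List.pyRange a b (-1)).find? p = none) :
    ∀ t, b < t → t ≤ a → p t = false := by
  intro t h1 h2
  have := List.find?_eq_none.mp h t (pvMem_pyRange_neg_one.mpr ⟨h1, h2⟩)
  simpa using this


lemma pvFindSome_desc_some {β : Type} {f : Int → Option β} {a b : Int} {v : β}
    (h : (PySem.List.pyRange a b (-1)).findSome? f = some v) :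
    ∃ s, b < s ∧ s ≤ a ∧ f s = some v ∧ ∀ t, s < t → t ≤ a → f t = none := by
  induction hn : (a - b).toNat generalizing a with
  | zero =>
    rw [PySem.List.pyRange_neg_one, show (a-b).toNat = 0 from hn] at h
    simp at h
  | succ n ih =>
    have hab : b < a := by omega
    rw [PySem.List.pyRange_neg_one_cons hab] at h
    rw [List.findSome?_cons] at h
    cases hf : f a with
    | some w =>
      simp only [hf] at h
      exact ⟨a, hab, le_refl _, by simp [hf, h], fun t h1 h2 => by omega⟩
    | none =>
      simp only [hf] at h
      obtain ⟨s, h1, h2, h3, h4⟩ := ih (a := a - 1) h (by omega)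
      refine ⟨s, h1, by omega, h3, fun t ht1 ht2 => ?_⟩
      rcases eq_or_lt_of_le ht2 with rfl | hlt
      · exact hf
      · exact h4 t ht1 (by omega)


lemma pvFindSome_asc_some {β : Type} {f : Int → Option β} {a b : Int} {v : β}
    (h : (PySem.List.pyRange a b 1).findSome? f = some v) :
    ∃ r, a ≤ r ∧ r < b ∧ f r = some v ∧ ∀ t, a ≤ t → t < r → f t = none := by
  induction hn : (b - a).toNat generalizing a with
  | zero =>
    rw [PySem.List.pyRange_one_eq_nil (by omega)] at h
    simp at h
  | succ n ih =>
    have hab : a < b := by omega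
    rw [PySem.List.pyRange_one_cons hab] at h
    rw [List.findSome?_cons] at h
    cases hf : f a with
    | some w =>
      simp only [hf] at h
      exact ⟨a, le_refl _, hab, by simp [hf, h], fun t h1 h2 => by omega⟩
    | none =>
      simp only [hf] at h
      obtain ⟨r, h1, h2, h3, h4⟩ := ih (a := a + 1) h (by omega)
      refine ⟨r, by omega, h2, h3, fun t ht1 ht2 => ?_⟩
      rcases eq_or_lt_of_le ht1 with rfl | hlt
      · exact hf
      · exact h4 t (by omega) ht2


lemma pvFind_asc_some {p : Int → Bool} {a b c : Int}
    (h : (PySem.List.pyRange a b 1).find? p = some c) :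
    a ≤ c ∧ c < b ∧ p c = true ∧ ∀ t, a ≤ t → t < c → p t = false := by
  induction hn : (b - a).toNat generalizing a with
  | zero =>
    rw [PySem.List.pyRange_one_eq_nil (by omega)] at h
    simp at h
  | succ n ih =>
    have hab : a < b := by omega
    rw [PySem.List.pyRange_one_cons hab] at h
    rw [List.find?_cons] at h
    by_cases hp : p a
    · simp [hp] at h
      subst h
      exact ⟨le_refl _, hab, hp, fun t h1 h2 => by omega⟩
    · rw [Bool.not_eq_true] at hp
      simp only [hp] at h
      obtain ⟨h1, h2, h3, h4⟩ := ih (a := a + 1) h (by omega)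
      refine ⟨by omega, h2, h3, fun t ht1 ht2 => ?_⟩
      rcases eq_or_lt_of_le ht1 with rfl | hlt
      · exact hp
      · exact h4 t (by omega) ht2


lemma pvFoldl_flat {β : Type} (f : β → Int → Int → β) (l1 l2 : List Int) (init : β) :
    l1.foldl (fun b r => l2.foldl (fun b c => f b r c) b) init
      = (l1.flatMap (fun r => l2.map (fun c => (r, c)))).foldl (fun b p => f b p.1 p.2) init := by
  induction l1 generalizing init with
  | nil => rfl
  | cons x t ih =>
    simp only [List.foldl_cons, List.flatMap_cons, List.foldl_append, List.foldl_map, ih]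


lemma pvZrun_ge_iff (l : List Int) (s : Nat) :
    s ≤ pvZrun l ↔ s ≤ l.length ∧ ∀ k, k < s → l.getD k 1 = 0 := by
  induction l generalizing s with
  | nil => cases s <;> simp [pvZrun]
  | cons x t ih =>
    cases s with
    | zero => simp
    | succ n =>
      simp only [pvZrun, List.length_cons]
      by_cases hx : x = 0
      · rw [if_pos hx]
        constructor
        · intro h1
          have := (ih n).mp (by omega)
          refine ⟨by omega, fun k hk => ?_⟩
          cases k with
          | zero => simpa using hx
          | succ j => simpa using this.2 j (by omega)
        · rintro ⟨h1, h2⟩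
          have : n ≤ pvZrun t := (ih n).mpr ⟨by omega, fun k hk => by simpa using h2 (k+1) (by omega)⟩
          omega
      · rw [if_neg hx]
        constructor
        · omega
        · rintro ⟨h1, h2⟩
          have := h2 0 (by omega)
          simp at this
          omega


lemma pvZrun_cons (x : Int) (t : List Int) :
    pvZrun (x :: t) = if x = 0 then pvZrun t + 1 else 0 := rfl

lemma pvCell_getD (m : List (List Int)) (C : Nat) {r c : Int} (_hr : 0 ≤ r) (hc : 0 ≤ c) (k : Nat) :
    (((PySem.List.pyGetD m r []).take C).drop c.toNat).getD k 1 = pvCell m C r (c + k) := by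
  unfold pvCell
  rw [PySem.List.pyGetD_of_nonneg _ _ (by omega : (0:Int) ≤ c + k)]
  have h1 : (c + (k:Int)).toNat = c.toNat + k := by omega
  rw [h1]
  simp [List.getD_eq_getElem?_getD, List.getElem?_drop]

lemma pvCell_colD (m : List (List Int)) (C : Nat) {r c : Int} (hr : 0 ≤ r) (hc : 0 ≤ c) (k : Nat) :
    ((pvColl m C c).drop r.toNat).getD k 1 = pvCell m C (r + k) c := by
  have h1 : (r + (k:Int)).toNat = r.toNat + k := by omega
  by_cases hlt : r.toNat + k < m.length
  · unfold pvCell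
    rw [PySem.List.pyGetD_eq_getElem m [] (by omega) (by omega)]
    simp only [h1]
    simp [pvColl, List.getD_eq_getElem?_getD, List.getElem?_drop, List.getElem?_eq_getElem hlt]
  · have hL : (pvColl m C c).length ≤ r.toNat + k := by simp [pvColl]; omega
    have hrow : PySem.List.pyGetD m (r + k) [] = [] := by
      rw [PySem.List.pyGetD_of_nonneg _ _ (by omega : (0:Int) ≤ r + k)]
      simp [List.getD_eq_getElem?_getD, List.getElem?_eq_none (show m.length ≤ (r + (k:Int)).toNat by omega)]
    unfold pvCell
    rw [hrow]
    rw [PySem.List.pyGetD_of_nonneg _ _ hc]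
    simp [List.getD_eq_getElem?_getD, List.getElem?_drop, List.getElem?_eq_none (show (pvColl m C c).length ≤ r.toNat + k from hL)]

-- ---------- cell/run facts ----------

lemma pvHead0 {m : List (List Int)} (h : m ≠ []) :
    PySem.List.pyGetD m 0 [] = m.headD [] := by
  rw [PySem.List.pyGetD_of_nonneg m ([]) (by norm_num)]
  cases m <;> simp


lemma pvCell_eq {m : List (List Int)} (hPre : Pre_findSquare_ref m) {r c : Int}
    (hr0 : 0 ≤ r) (hr : r < (pvR m : Int)) (hc0 : 0 ≤ c) (hc : c < (pvC m : Int)) :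
    PySem.List.pyGetD (PySem.List.pyGetD m r []) c 1 = pvCell m (pvC m) r c := by
  unfold pvR at hr
  unfold pvC at hc ⊢
  have hrl : r.toNat < m.length := by omega
  have hrow : PySem.List.pyGetD m r [] = m[r.toNat] := PySem.List.pyGetD_eq_getElem m [] hr0 (by omega)
  have hlen : (m.headD []).length ≤ (m[r.toNat]).length := hPre _ (List.getElem_mem hrl)
  have hcl : c.toNat < (m[r.toNat]).length := by omega
  have hcC : c.toNat < (m.headD []).length := by omega
  unfold pvCell
  rw [hrow, PySem.List.pyGetD_of_nonneg _ _ hc0, PySem.List.pyGetD_of_nonneg _ _ hc0]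
  simp only [List.getD_eq_getElem?_getD, List.getElem?_take]
  rw [if_pos hcC]


lemma pvCell_default {m : List (List Int)} {C : Nat} {r c : Int}
    (h : (C : Int) ≤ c) : pvCell m C r c = 1 := by
  have hc0 : (0:Int) ≤ c := le_trans (by exact_mod_cast Nat.zero_le C) h
  unfold pvCell
  rw [PySem.List.pyGetD_of_nonneg _ _ hc0]
  have : ((PySem.List.pyGetD m r []).take C).length ≤ c.toNat := by
    have := List.length_take_le C (PySem.List.pyGetD m r [])
    omega
  simp [List.getD_eq_getElem?_getD, List.getElem?_eq_none this]


lemma pvFh_rec (m : List (List Int)) (C : Nat) {r c : Int} (hr : 0 ≤ r) (hc : 0 ≤ c) :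
    pvFh m C r c = if pvCell m C r c = 0 then 1 + pvFh m C r (c + 1) else 0 := by
  unfold pvFh pvCell
  rw [if_pos (show 0 ≤ r ∧ 0 ≤ c from ⟨hr, hc⟩), if_pos (show 0 ≤ r ∧ 0 ≤ c + 1 from ⟨hr, by omega⟩)]
  set l := (PySem.List.pyGetD m r []).take C with hl
  rw [PySem.List.pyGetD_of_nonneg _ _ hc]
  by_cases hlt : c.toNat < l.length
  · rw [List.drop_eq_getElem_cons hlt]
    have h1 : pvZrun (l[c.toNat] :: l.drop (c.toNat + 1)) =
        if l[c.toNat] = 0 then pvZrun (l.drop (c.toNat + 1)) + 1 else 0 := rfl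
    rw [h1]
    have h2 : l.getD c.toNat 1 = l[c.toNat] := List.getD_eq_getElem l 1 hlt
    rw [h2]
    have h3 : (c + 1).toNat = c.toNat + 1 := by omega
    rw [h3]
    split_ifs with h4
    · push_cast; ring
    · rfl
  · rw [List.drop_eq_nil_of_le (by omega)]
    have h2 : l.getD c.toNat 1 = 1 := by
      simp [List.getD_eq_getElem?_getD, List.getElem?_eq_none (by omega : l.length ≤ c.toNat)]
    rw [h2]
    norm_num [pvZrun]


lemma pvFv_rec (m : List (List Int)) (C : Nat) {r c : Int} (hr : 0 ≤ r) (hc : 0 ≤ c) :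
    pvFv m C r c = if pvCell m C r c = 0 then 1 + pvFv m C (r + 1) c else 0 := by
  unfold pvFv pvCell
  rw [if_pos (show 0 ≤ r ∧ 0 ≤ c from ⟨hr, hc⟩), if_pos (show 0 ≤ r + 1 ∧ 0 ≤ c from ⟨by omega, hc⟩)]
  by_cases hlt : r.toNat < (pvColl m C c).length
  · rw [List.drop_eq_getElem_cons hlt]
    have hlen : r.toNat < m.length := by simpa [pvColl] using hlt
    have h1 : (pvColl m C c)[r.toNat] = PySem.List.pyGetD ((m[r.toNat]).take C) c 1 := by
      simp [pvColl]
    have hrow : PySem.List.pyGetD m r [] = m[r.toNat] :=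
      PySem.List.pyGetD_eq_getElem m [] hr (by omega)
    have h3 : (r + 1).toNat = r.toNat + 1 := by omega
    rw [pvZrun_cons, h1, hrow, h3]
    split_ifs with h4
    · push_cast; ring
    · rfl
  · have hlen : m.length ≤ r.toNat := by simp [pvColl] at hlt; omega
    rw [List.drop_eq_nil_of_le (by omega)]
    have hrow : PySem.List.pyGetD m r [] = [] := by
      rw [PySem.List.pyGetD_of_nonneg _ _ hr]
      simp [List.getD_eq_getElem?_getD, List.getElem?_eq_none hlen]
    rw [hrow]
    rw [PySem.List.pyGetD_of_nonneg _ _ hc]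
    norm_num [pvZrun]


lemma pvFh_zero_of_ge (m : List (List Int)) (C : Nat) {r : Int} (c : Int)
    (h : (pvR m : Int) ≤ r) : pvFh m C r c = 0 := by
  unfold pvFh
  split_ifs with hg
  · have hrow : PySem.List.pyGetD m r [] = [] := by
      rw [PySem.List.pyGetD_of_nonneg _ _ hg.1]
      simp [List.getD_eq_getElem?_getD,
        List.getElem?_eq_none (show m.length ≤ r.toNat by unfold pvR at h; omega)]
    rw [hrow]
    simp [pvZrun]
  · rfl


lemma pvFv_zero_of_ge (m : List (List Int)) (C : Nat) {r : Int} (c : Int)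
    (h : (pvR m : Int) ≤ r) : pvFv m C r c = 0 := by
  unfold pvFv
  split_ifs with hg
  · rw [List.drop_eq_nil_of_le (by simp [pvColl]; unfold pvR at h; omega)]
    simp [pvZrun]
  · rfl


lemma pvFh_ge_iff {m : List (List Int)} (hPre : Pre_findSquare_ref m) {r c s : Int}
    (hr : 0 ≤ r) (hc : 0 ≤ c) (hs : 1 ≤ s) :
    s ≤ pvFh m (pvC m) r c ↔
      (c + s ≤ (pvC m : Int) ∧ ∀ k : Int, 0 ≤ k → k < s → pvCell m (pvC m) r (c + k) = 0) := by
  unfold pvFh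
  rw [if_pos (show 0 ≤ r ∧ 0 ≤ c from ⟨hr, hc⟩)]
  rcases lt_or_ge r (pvR m : Int) with hlt | hge
  · have hrl : r.toNat < m.length := by unfold pvR at hlt; omega
    have hlen : pvC m ≤ (m[r.toNat]).length := hPre _ (List.getElem_mem hrl)
    have hrow : PySem.List.pyGetD m r [] = m[r.toNat] :=
      PySem.List.pyGetD_eq_getElem m [] hr (by omega)
    have hlenD : (((PySem.List.pyGetD m r []).take (pvC m)).drop c.toNat).length
        = pvC m - c.toNat := by
      rw [hrow]; simp; omega
    constructor
    · intro hZ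
      obtain ⟨h1, h2⟩ := (pvZrun_ge_iff (((PySem.List.pyGetD m r []).take (pvC m)).drop c.toNat) s.toNat).mp (by omega)
      refine ⟨by omega, fun k hk0 hk1 => ?_⟩
      have hck : c + k = c + ((k.toNat : Int)) := by omega
      rw [hck, ← pvCell_getD m (pvC m) hr hc]
      exact h2 k.toNat (by omega)
    · rintro ⟨h1, h2⟩
      have : s.toNat ≤ pvZrun (((PySem.List.pyGetD m r []).take (pvC m)).drop c.toNat) := by
        refine (pvZrun_ge_iff _ s.toNat).mpr ⟨by omega, fun k hk => ?_⟩
        rw [pvCell_getD m (pvC m) hr hc]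
        exact h2 k (by omega) (by omega)
      omega
  · have hrow : PySem.List.pyGetD m r [] = [] := by
      rw [PySem.List.pyGetD_of_nonneg _ _ hr]
      simp [List.getD_eq_getElem?_getD,
        List.getElem?_eq_none (show m.length ≤ r.toNat by unfold pvR at hge; omega)]
    rw [hrow]
    constructor
    · intro hZ
      exfalso
      simp [pvZrun] at hZ
      omega
    · rintro ⟨h1, h2⟩
      exfalso
      have h0 := h2 0 le_rfl (by omega)
      unfold pvCell at h0
      rw [hrow] at h0
      rw [PySem.List.pyGetD_of_nonneg _ _ (by omega : (0:Int) ≤ c + 0)] at h0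
      simp at h0


lemma pvFv_ge_iff {m : List (List Int)} {r c s : Int}
    (hr : 0 ≤ r) (hc : 0 ≤ c) (hs : 1 ≤ s) :
    s ≤ pvFv m (pvC m) r c ↔
      ((r + s ≤ (pvR m : Int)) ∧ ∀ k : Int, 0 ≤ k → k < s → pvCell m (pvC m) (r + k) c = 0) := by
  unfold pvFv
  rw [if_pos (show 0 ≤ r ∧ 0 ≤ c from ⟨hr, hc⟩)]
  have hlenD : ((pvColl m (pvC m) c).drop r.toNat).length = m.length - r.toNat := by
    simp [pvColl]
  constructor
  · intro hZ
    obtain ⟨h1, h2⟩ := (pvZrun_ge_iff ((pvColl m (pvC m) c).drop r.toNat) s.toNat).mp (by omega)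
    have hRr : r + s ≤ (pvR m : Int) := by unfold pvR; omega
    refine ⟨hRr, fun k hk0 hk1 => ?_⟩
    have hrk : r + k = r + ((k.toNat : Int)) := by omega
    rw [hrk, ← pvCell_colD m (pvC m) hr hc]
    exact h2 k.toNat (by omega)
  · rintro ⟨h1, h2⟩
    have : s.toNat ≤ pvZrun ((pvColl m (pvC m) c).drop r.toNat) := by
      refine (pvZrun_ge_iff _ s.toNat).mpr ⟨by unfold pvR at h1; omega, fun k hk => ?_⟩
      rw [pvCell_colD m (pvC m) hr hc]
      exact h2 k (by omega) (by omega)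
    omega


lemma pvValid_iff_chk {m : List (List Int)} (hPre : Pre_findSquare_ref m) {r c s : Int}
    (hr : 0 ≤ r) (hc : 0 ≤ c) (hs : 1 ≤ s) :
    pvValid m r c s ↔
      (s ≤ pvFh m (pvC m) r c ∧ s ≤ pvFv m (pvC m) r c ∧
       s ≤ pvFv m (pvC m) r (c + s - 1) ∧ s ≤ pvFh m (pvC m) (r + s - 1) c) := by
  have hA := pvFh_ge_iff hPre hr hc hs
  have hB := pvFv_ge_iff (m := m) hr hc hs
  have hBc := pvFv_ge_iff (m := m) hr (show (0:Int) ≤ c + s - 1 by omega) hs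
  have hAb := pvFh_ge_iff hPre (show (0:Int) ≤ r + s - 1 by omega) hc hs
  unfold pvValid
  constructor
  · rintro ⟨_, _, _, hRs, hCs, hedge⟩
    refine ⟨hA.mpr ⟨hCs, fun k hk0 hk1 => (hedge k hk0 hk1).1⟩,
            hB.mpr ⟨hRs, fun k hk0 hk1 => (hedge k hk0 hk1).2.2.1⟩,
            hBc.mpr ⟨hRs, fun k hk0 hk1 => (hedge k hk0 hk1).2.2.2⟩,
            hAb.mpr ⟨hCs, fun k hk0 hk1 => (hedge k hk0 hk1).2.1⟩⟩
  · rintro ⟨h1, h2, h3, h4⟩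
    obtain ⟨hCs, htop⟩ := hA.mp h1
    obtain ⟨hRs, hleft⟩ := hB.mp h2
    obtain ⟨-, hright⟩ := hBc.mp h3
    obtain ⟨-, hbot⟩ := hAb.mp h4
    exact ⟨hr, hc, hs, hRs, hCs, fun k hk0 hk1 =>
      ⟨htop k hk0 hk1, hbot k hk0 hk1, hleft k hk0 hk1, hright k hk0 hk1⟩⟩


lemma pvValid_bounds {m : List (List Int)} {r c s : Int} (h : pvValid m r c s) :
    0 ≤ r ∧ 0 ≤ c ∧ 1 ≤ s ∧ r + s ≤ (pvR m : Int) ∧ c + s ≤ (pvC m : Int) :=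
  ⟨h.1, h.2.1, h.2.2.1, h.2.2.2.1, h.2.2.2.2.1⟩

lemma pvNotValid_of_cell {m : List (List Int)} {r c : Int}
    (h : pvCell m (pvC m) r c ≠ 0) (s : Int) : ¬ pvValid m r c s := by
  rintro ⟨hr, hc, hs, hRs, hCs, hedge⟩
  have := (hedge 0 le_rfl (by omega)).1
  rw [add_zero] at this
  exact h this


-- ---------- the dictionary build ----------

lemma pvFh_nonneg (m : List (List Int)) (C : Nat) (r c : Int) : 0 ≤ pvFh m C r c := by
  unfold pvFh; split_ifs <;> simp

lemma pvFv_nonneg (m : List (List Int)) (C : Nat) (r c : Int) : 0 ≤ pvFv m C r c := by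
  unfold pvFv; split_ifs <;> simp

lemma pvFh_zero_of_geC {m : List (List Int)} (hPre : Pre_findSquare_ref m) {r c : Int}
    (h : (pvC m : Int) ≤ c) : pvFh m (pvC m) r c = 0 := by
  by_cases hg : 0 ≤ r ∧ 0 ≤ c
  · have h1 := pvFh_ge_iff hPre hg.1 hg.2 (le_refl 1)
    have h2 := pvFh_nonneg m (pvC m) r c
    by_contra hne
    have : (1:Int) ≤ pvFh m (pvC m) r c := by omega
    have := (h1.mp this).1
    omega
  · unfold pvFh; rw [if_neg hg]

lemma pvFv_zero_of_geC {m : List (List Int)} {r c : Int}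
    (h : (pvC m : Int) ≤ c) : pvFv m (pvC m) r c = 0 := by
  by_cases hg : 0 ≤ r ∧ 0 ≤ c
  · have h1 := pvFv_ge_iff (m := m) hg.1 hg.2 (le_refl 1)
    have h2 := pvFv_nonneg m (pvC m) r c
    by_contra hne
    have : (1:Int) ≤ pvFv m (pvC m) r c := by omega
    have := (h1.mp this).2 0 le_rfl (by omega)
    rw [add_zero, pvCell_default h] at this
    omega
  · unfold pvFv; rw [if_neg hg]

lemma pvInner_inv {m : List (List Int)} (hPre : Pre_findSquare_ref m) {r0 : Int}
    (hr0 : 0 ≤ r0) (hr0R : r0 < (pvR m : Int))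
    {st : PySem.Dict (Int × Int) Int × PySem.Dict (Int × Int) Int}
    (hst1 : ∀ r c : Int, st.1.getD (r, c) 0 = if r0 + 1 ≤ r then pvFh m (pvC m) r c else 0)
    (hst2 : ∀ r c : Int, st.2.getD (r, c) 0 = if r0 + 1 ≤ r then pvFv m (pvC m) r c else 0) :
    ∀ (c0 : Int), 0 ≤ c0 → c0 ≤ (pvC m : Int) →
      ∀ r c : Int,
        ((((PySem.List.pyRange c0 ((pvC m : Int)) 1).reverse).foldl
            (fun st c => pvStepA m st r0 c) st).1.getD (r, c) 0
          = if r0 + 1 ≤ r ∨ (r = r0 ∧ c0 ≤ c) then pvFh m (pvC m) r c else 0) ∧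
        ((((PySem.List.pyRange c0 ((pvC m : Int)) 1).reverse).foldl
            (fun st c => pvStepA m st r0 c) st).2.getD (r, c) 0
          = if r0 + 1 ≤ r ∨ (r = r0 ∧ c0 ≤ c) then pvFv m (pvC m) r c else 0) := by
  intro c0 hc0 hc0C
  induction hn : ((pvC m : Int) - c0).toNat generalizing c0 with
  | zero =>
    have hc0e : c0 = (pvC m : Int) := by omega
    subst hc0e
    rw [PySem.List.pyRange_one_eq_nil (le_refl _)]
    intro r c
    simp only [List.reverse_nil, List.foldl_nil]
    constructor
    · rw [hst1 r c]
      by_cases h1 : r0 + 1 ≤ r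
      · rw [if_pos h1, if_pos (Or.inl h1)]
      · by_cases h2 : r = r0 ∧ (pvC m : Int) ≤ c
        · rw [if_neg h1, if_pos (Or.inr h2), pvFh_zero_of_geC hPre h2.2]
        · rw [if_neg h1, if_neg (by omega)]
    · rw [hst2 r c]
      by_cases h1 : r0 + 1 ≤ r
      · rw [if_pos h1, if_pos (Or.inl h1)]
      · by_cases h2 : r = r0 ∧ (pvC m : Int) ≤ c
        · rw [if_neg h1, if_pos (Or.inr h2), pvFv_zero_of_geC h2.2]
        · rw [if_neg h1, if_neg (by omega)]
  | succ n ih =>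
    have hlt : c0 < (pvC m : Int) := by omega
    rw [PySem.List.pyRange_one_cons hlt, List.reverse_cons, List.foldl_append]
    have ihc := ih (c0 + 1) (by omega) (by omega) (by omega)
    set st' := (((PySem.List.pyRange (c0 + 1) ((pvC m : Int)) 1).reverse).foldl
        (fun st c => pvStepA m st r0 c) st) with hst'
    simp only [List.foldl_cons, List.foldl_nil]
    have hbridge : PySem.List.pyGetD (PySem.List.pyGetD m r0 []) c0 1 = pvCell m (pvC m) r0 c0 :=
      pvCell_eq hPre hr0 hr0R hc0 hlt
    unfold pvStepA
    rw [hbridge]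
    by_cases hcell : pvCell m (pvC m) r0 c0 = 0
    · rw [if_pos hcell]
      intro r c
      have hv1 : (1 : Int) + st'.1.getD (r0, c0 + 1) 0 = pvFh m (pvC m) r0 c0 := by
        rw [(ihc r0 (c0 + 1)).1, if_pos (Or.inr ⟨rfl, le_refl _⟩),
          pvFh_rec m (pvC m) hr0 hc0, if_pos hcell]
      have hv2 : (1 : Int) + st'.2.getD (r0 + 1, c0) 0 = pvFv m (pvC m) r0 c0 := by
        rw [(ihc (r0 + 1) c0).2, if_pos (Or.inl (le_refl _)),
          pvFv_rec m (pvC m) hr0 hc0, if_pos hcell]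
      constructor
      · show (st'.1.insert (r0, c0) _).getD (r, c) 0 = _
        rw [PySem.Dict.getD_insert]
        by_cases hk : (r, c) = ((r0, c0) : Int × Int)
        · rw [if_pos hk]
          obtain ⟨h1, h2⟩ := Prod.mk.injEq .. ▸ hk
          rw [hv1]
          subst h1; subst h2
          rw [if_pos (Or.inr ⟨rfl, le_refl _⟩)]
        · rw [if_neg hk, (ihc r c).1]
          have hne : ¬(r = r0 ∧ c = c0) := by
            intro hand; exact hk (by rw [hand.1, hand.2])
          by_cases h1 : r0 + 1 ≤ r
          · rw [if_pos (Or.inl h1), if_pos (Or.inl h1)]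
          · by_cases h2 : r = r0 ∧ c0 ≤ c
            · have : c0 + 1 ≤ c := by
                rcases lt_or_ge c0 c with h | h
                · omega
                · exfalso; exact hne ⟨h2.1, by omega⟩
              rw [if_pos (Or.inr ⟨h2.1, this⟩), if_pos (Or.inr h2)]
            · rw [if_neg (by omega), if_neg (by omega)]
      · show (st'.2.insert (r0, c0) _).getD (r, c) 0 = _
        rw [PySem.Dict.getD_insert]
        by_cases hk : (r, c) = ((r0, c0) : Int × Int)
        · rw [if_pos hk]
          obtain ⟨h1, h2⟩ := Prod.mk.injEq .. ▸ hk
          rw [hv2]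
          subst h1; subst h2
          rw [if_pos (Or.inr ⟨rfl, le_refl _⟩)]
        · rw [if_neg hk, (ihc r c).2]
          have hne : ¬(r = r0 ∧ c = c0) := by
            intro hand; exact hk (by rw [hand.1, hand.2])
          by_cases h1 : r0 + 1 ≤ r
          · rw [if_pos (Or.inl h1), if_pos (Or.inl h1)]
          · by_cases h2 : r = r0 ∧ c0 ≤ c
            · have : c0 + 1 ≤ c := by
                rcases lt_or_ge c0 c with h | h
                · omega
                · exfalso; exact hne ⟨h2.1, by omega⟩
              rw [if_pos (Or.inr ⟨h2.1, this⟩), if_pos (Or.inr h2)]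
            · rw [if_neg (by omega), if_neg (by omega)]
    · rw [if_neg hcell]
      intro r c
      have hFh0 : pvFh m (pvC m) r0 c0 = 0 := by
        rw [pvFh_rec m (pvC m) hr0 hc0, if_neg hcell]
      have hFv0 : pvFv m (pvC m) r0 c0 = 0 := by
        rw [pvFv_rec m (pvC m) hr0 hc0, if_neg hcell]
      constructor
      · rw [(ihc r c).1]
        by_cases h1 : r0 + 1 ≤ r
        · rw [if_pos (Or.inl h1), if_pos (Or.inl h1)]
        · by_cases h2 : r = r0 ∧ c0 ≤ c
          · by_cases h3 : c = c0
            · rw [if_neg (by subst h3; omega), if_pos (Or.inr h2), h2.1, h3, hFh0]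
            · rw [if_pos (Or.inr ⟨h2.1, by omega⟩), if_pos (Or.inr h2)]
          · rw [if_neg (by omega), if_neg (by omega)]
      · rw [(ihc r c).2]
        by_cases h1 : r0 + 1 ≤ r
        · rw [if_pos (Or.inl h1), if_pos (Or.inl h1)]
        · by_cases h2 : r = r0 ∧ c0 ≤ c
          · by_cases h3 : c = c0
            · rw [if_neg (by subst h3; omega), if_pos (Or.inr h2), h2.1, h3, hFv0]
            · rw [if_pos (Or.inr ⟨h2.1, by omega⟩), if_pos (Or.inr h2)]
          · rw [if_neg (by omega), if_neg (by omega)]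

def pvBuild (m : List (List Int)) : PySem.Dict (Int × Int) Int × PySem.Dict (Int × Int) Int :=
  ((PySem.List.pyRange 0 (m.length : Int) 1).reverse).foldl
    (fun st r => ((PySem.List.pyRange 0 ((pvC m : Int)) 1).reverse).foldl
      (fun st c => pvStepA m st r c) st)
    (PySem.Dict.empty, PySem.Dict.empty)

lemma pvOuter_inv {m : List (List Int)} (hPre : Pre_findSquare_ref m) :
    ∀ (r0 : Int), 0 ≤ r0 → r0 ≤ (pvR m : Int) →
      ∀ r c : Int,
        ((((PySem.List.pyRange r0 ((pvR m : Int)) 1).reverse).foldl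
            (fun st r => ((PySem.List.pyRange 0 ((pvC m : Int)) 1).reverse).foldl
              (fun st c => pvStepA m st r c) st)
            (PySem.Dict.empty, PySem.Dict.empty)).1.getD (r, c) 0
          = if r0 ≤ r then pvFh m (pvC m) r c else 0) ∧
        ((((PySem.List.pyRange r0 ((pvR m : Int)) 1).reverse).foldl
            (fun st r => ((PySem.List.pyRange 0 ((pvC m : Int)) 1).reverse).foldl
              (fun st c => pvStepA m st r c) st)
            (PySem.Dict.empty, PySem.Dict.empty)).2.getD (r, c) 0
          = if r0 ≤ r then pvFv m (pvC m) r c else 0) := by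
  intro r0 hr0 hr0R
  induction hn : ((pvR m : Int) - r0).toNat generalizing r0 with
  | zero =>
    have hr0e : r0 = (pvR m : Int) := by omega
    subst hr0e
    rw [PySem.List.pyRange_one_eq_nil (le_refl _)]
    intro r c
    simp only [List.reverse_nil, List.foldl_nil]
    constructor
    · show (PySem.Dict.empty : PySem.Dict (Int × Int) Int).getD (r, c) 0 = _
      rw [PySem.Dict.getD_empty]
      by_cases h1 : (pvR m : Int) ≤ r
      · rw [if_pos h1, pvFh_zero_of_ge m (pvC m) c h1]
      · rw [if_neg h1]
    · show (PySem.Dict.empty : PySem.Dict (Int × Int) Int).getD (r, c) 0 = _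
      rw [PySem.Dict.getD_empty]
      by_cases h1 : (pvR m : Int) ≤ r
      · rw [if_pos h1, pvFv_zero_of_ge m (pvC m) c h1]
      · rw [if_neg h1]
  | succ n ih =>
    have hlt : r0 < (pvR m : Int) := by omega
    rw [PySem.List.pyRange_one_cons hlt, List.reverse_cons, List.foldl_append]
    have ihr := ih (r0 + 1) (by omega) (by omega) (by omega)
    simp only [List.foldl_cons, List.foldl_nil]
    have hinner := pvInner_inv hPre hr0 hlt
      (fun r c => (ihr r c).1) (fun r c => (ihr r c).2) 0 le_rfl (by positivity)
    intro r c
    constructor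
    · rw [(hinner r c).1]
      by_cases h1 : r0 + 1 ≤ r
      · rw [if_pos (Or.inl h1), if_pos (by omega)]
      · by_cases h2 : r = r0 ∧ 0 ≤ c
        · rw [if_pos (Or.inr h2), if_pos (by omega)]
        · by_cases h3 : r = r0
          · rw [if_neg (by omega), if_pos (by omega)]
            unfold pvFh
            rw [if_neg (by omega)]
          · rw [if_neg (by omega), if_neg (by omega)]
    · rw [(hinner r c).2]
      by_cases h1 : r0 + 1 ≤ r
      · rw [if_pos (Or.inl h1), if_pos (by omega)]
      · by_cases h2 : r = r0 ∧ 0 ≤ c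
        · rw [if_pos (Or.inr h2), if_pos (by omega)]
        · by_cases h3 : r = r0
          · rw [if_neg (by omega), if_pos (by omega)]
            unfold pvFv
            rw [if_neg (by omega)]
          · rw [if_neg (by omega), if_neg (by omega)]

lemma pvBuild_getD {m : List (List Int)} (hPre : Pre_findSquare_ref m) (r c : Int) :
    (pvBuild m).1.getD (r, c) 0 = pvFh m (pvC m) r c ∧
    (pvBuild m).2.getD (r, c) 0 = pvFv m (pvC m) r c := by
  have h := pvOuter_inv hPre 0 le_rfl (by positivity) r c
  unfold pvBuild
  have hRe : (m.length : Int) = (pvR m : Int) := rfl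
  rw [hRe]
  constructor
  · rw [h.1]
    by_cases h1 : (0:Int) ≤ r
    · rw [if_pos h1]
    · rw [if_neg h1]
      unfold pvFh
      rw [if_neg (by omega)]
  · rw [h.2]
    by_cases h1 : (0:Int) ≤ r
    · rw [if_pos h1]
    · rw [if_neg h1]
      unfold pvFv
      rw [if_neg (by omega)]


lemma pvBuildA_eq {m : List (List Int)} (hm : m ≠ []) : pvBuildA m = pvBuild m := by
  unfold pvBuildA pvBuild
  rw [pvHead0 hm]
  rfl

-- ---------- A's forward scan ----------

def pvCur (res : List Int) : Int := if res = [] then 0 else PySem.List.pyGetD res 2 0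

def pvStepAbs (m : List (List Int)) (res : List Int) (p : Int × Int) : List Int :=
  if pvCell m (pvC m) p.1 p.2 = 0 then
    match (PySem.List.pyRange (min (pvFh m (pvC m) p.1 p.2) (pvFv m (pvC m) p.1 p.2)) (pvCur res) (-1)).find?
        (fun s => decide (s ≤ pvFv m (pvC m) p.1 (p.2 + s - 1)) && decide (s ≤ pvFh m (pvC m) (p.1 + s - 1) p.2)) with
    | some s => [p.1, p.2, s]
    | none => res
  else res

def pvCells (R C : Int) : List (Int × Int) :=
  (PySem.List.pyRange 0 R 1).flatMap (fun r => (PySem.List.pyRange 0 C 1).map (fun c => (r, c)))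

lemma pvMem_cells {R C : Int} {p : Int × Int} :
    p ∈ pvCells R C ↔ 0 ≤ p.1 ∧ p.1 < R ∧ 0 ≤ p.2 ∧ p.2 < C := by
  unfold pvCells
  simp only [List.mem_flatMap, List.mem_map, PySem.List.mem_pyRange_one]
  constructor
  · rintro ⟨r, ⟨h1, h2⟩, c, ⟨h3, h4⟩, rfl⟩
    exact ⟨h1, h2, h3, h4⟩
  · rintro ⟨h1, h2, h3, h4⟩
    exact ⟨p.1, ⟨h1, h2⟩, p.2, ⟨h3, h4⟩, by simp⟩


lemma pvCells_pairwise (R C : Int) : (pvCells R C).Pairwise pvLexLt := by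
  unfold pvCells
  rw [List.pairwise_flatMap]
  constructor
  · intro a _
    rw [List.pairwise_map]
    refine (PySem.List.pairwise_lt_pyRange_one 0 C).imp ?_
    intro x y hxy
    exact Or.inr ⟨rfl, hxy⟩
  · refine (PySem.List.pairwise_lt_pyRange_one 0 R).imp ?_
    intro a b hab x hx y hy
    simp only [List.mem_map] at hx hy
    obtain ⟨cx, -, rfl⟩ := hx
    obtain ⟨cy, -, rfl⟩ := hy
    exact Or.inl hab


lemma pvA_eq_scan {m : List (List Int)} (hm : m ≠ []) (hPre : Pre_findSquare_ref m) :
    findSquare_ref m = (pvCells (pvR m : Int) (pvC m : Int)).foldl (pvStepAbs m) [] := by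
  have hkey1 : ∀ r c : Int, (pvBuildA m).1.getD (r, c) 0 = pvFh m (pvC m) r c := fun r c => by
    rw [pvBuildA_eq hm]; exact (pvBuild_getD hPre r c).1
  have hkey2 : ∀ r c : Int, (pvBuildA m).2.getD (r, c) 0 = pvFv m (pvC m) r c := fun r c => by
    rw [pvBuildA_eq hm]; exact (pvBuild_getD hPre r c).2
  simp only [findSquare_ref, if_neg hm]
  simp only [hkey1, hkey2]
  rw [show ((PySem.List.pyGetD m 0 []).length : Int) = ((pvC m : Int)) from by rw [pvHead0 hm]; rfl]
  rw [show ((m.length : Int)) = ((pvR m : Int)) from rfl]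
  rw [pvFoldl_flat]
  refine PySem.List.foldl_congr_mem (pvCells (pvR m : Int) (pvC m : Int)) _ _ [] ?_
  intro acc p hp
  obtain ⟨h1, h2, h3, h4⟩ := pvMem_cells.mp hp
  simp only [pvStepAbs, pvCur]
  rw [pvCell_eq hPre h1 h2 h3 h4]


def pvInv (m : List (List Int)) (P : List (Int × Int)) (res : List Int) : Prop :=
  (res = [] ∧ ∀ p ∈ P, ∀ s : Int, ¬ pvValid m p.1 p.2 s) ∨
  (∃ r c s : Int, res = [r, c, s] ∧ (r, c) ∈ P ∧ pvValid m r c s ∧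
    (∀ p ∈ P, ∀ s' : Int, s < s' → ¬ pvValid m p.1 p.2 s') ∧
    (∀ p ∈ P, pvLexLt p (r, c) → ¬ pvValid m p.1 p.2 s))

lemma pvCur_val (r c s : Int) : pvCur [r, c, s] = s := by
  unfold pvCur
  rw [if_neg (by simp)]
  rw [PySem.List.pyGetD_of_nonneg _ _ (by norm_num)]
  rfl

lemma pvValid_mem {m : List (List Int)} {r c s : Int} (h : pvValid m r c s) :
    (r, c) ∈ pvCells ((pvR m : Int)) ((pvC m : Int)) := by
  obtain ⟨h1, h2, h3, h4, h5⟩ := pvValid_bounds h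
  exact pvMem_cells.mpr ⟨h1, by omega, h2, by omega⟩

lemma pvLexLt_asymm {p q : Int × Int} (h : pvLexLt p q) : ¬ pvLexLt q p := by
  unfold pvLexLt at *
  omega

lemma pvStep {m : List (List Int)} (hPre : Pre_findSquare_ref m) {q : Int × Int}
    {P : List (Int × Int)} {res : List Int}
    (hq : 0 ≤ q.1 ∧ q.1 < (pvR m : Int) ∧ 0 ≤ q.2 ∧ q.2 < (pvC m : Int))
    (hbefore : ∀ p ∈ P, pvLexLt p q) (hinv : pvInv m P res) :
    pvInv m (P ++ [q]) (pvStepAbs m res q) := by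
  obtain ⟨hq1, hq2, hq3, hq4⟩ := hq
  have hcur0 : 0 ≤ pvCur res ∧
      (res = [] ∧ pvCur res = 0 ∨
       ∃ r c s, res = [r, c, s] ∧ pvCur res = s ∧ (r, c) ∈ P ∧ pvValid m r c s ∧
         (∀ p ∈ P, ∀ s' : Int, s < s' → ¬ pvValid m p.1 p.2 s') ∧
         (∀ p ∈ P, pvLexLt p (r, c) → ¬ pvValid m p.1 p.2 s)) := by
    rcases hinv with ⟨hres, hall⟩ | ⟨r, c, s, hres, hmem, hval, hmax, hlex⟩
    · subst hres; exact ⟨le_refl _, Or.inl ⟨rfl, rfl⟩⟩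
    · subst hres
      rw [pvCur_val]
      exact ⟨by have := hval.2.2.1; omega,
        Or.inr ⟨r, c, s, rfl, pvCur_val r c s, hmem, hval, hmax, hlex⟩⟩
  unfold pvStepAbs
  by_cases hcell : pvCell m (pvC m) q.1 q.2 = 0
  · rw [if_pos hcell]
    cases hfind : (PySem.List.pyRange
        (min (pvFh m (pvC m) q.1 q.2) (pvFv m (pvC m) q.1 q.2)) (pvCur res) (-1)).find?
        (fun s => decide (s ≤ pvFv m (pvC m) q.1 (q.2 + s - 1)) &&
                  decide (s ≤ pvFh m (pvC m) (q.1 + s - 1) q.2)) with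
    | some s =>
      obtain ⟨hgt, hle, hchk, hnone⟩ := pvFind_desc_some hfind
      simp only [Bool.and_eq_true, decide_eq_true_eq] at hchk
      have hs1 : 1 ≤ s := by omega
      have hlemin := le_min_iff.mp hle
      have hvalq : pvValid m q.1 q.2 s :=
        (pvValid_iff_chk hPre hq1 hq3 hs1).mpr ⟨hlemin.1, hlemin.2, hchk.1, hchk.2⟩
      have hmaxq : ∀ s' : Int, s < s' → ¬ pvValid m q.1 q.2 s' := by
        intro s' hs' hv
        have hchk' := (pvValid_iff_chk hPre hq1 hq3 (by omega)).mp hv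
        have hle' : s' ≤ min (pvFh m (pvC m) q.1 q.2) (pvFv m (pvC m) q.1 q.2) :=
          le_min hchk'.1 hchk'.2.1
        have hfalse := hnone s' hs' hle'
        simp only [Bool.and_eq_false_iff, decide_eq_false_iff_not] at hfalse
        rcases hfalse with h | h
        · exact h hchk'.2.2.1
        · exact h hchk'.2.2.2
      right
      refine ⟨q.1, q.2, s, rfl, List.mem_append_right _ (by simp), hvalq, ?_, ?_⟩
      · intro p hp s' hs'
        rcases List.mem_append.mp hp with h | h
        · rcases hcur0.2 with ⟨hres, hc0⟩ | ⟨r, c, s0, hres, hc0, hmem, hval, hmax, hlex⟩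
          · subst hres
            rcases hinv with ⟨-, hall⟩ | ⟨r, c, s0, habs, -⟩
            · exact hall p h s'
            · simp at habs
          · exact hmax p h s' (by omega)
        · simp at h
          rw [h]
          exact hmaxq s' hs'
      · intro p hp hplex
        rcases List.mem_append.mp hp with h | h
        · rcases hcur0.2 with ⟨hres, hc0⟩ | ⟨r, c, s0, hres, hc0, hmem, hval, hmax, hlex⟩
          · subst hres
            rcases hinv with ⟨-, hall⟩ | ⟨r, c, s0, habs, -⟩
            · exact hall p h s
            · simp at habs
          · exact hmax p h s (by omega)
        · simp at h
          subst h
          exact absurd hplex (by unfold pvLexLt; omega)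
    | none =>
      have hnone := pvFind_desc_none hfind
      have hnvq : ∀ s' : Int, pvCur res < s' → ¬ pvValid m q.1 q.2 s' := by
        intro s' hs' hv
        have hchk' := (pvValid_iff_chk hPre hq1 hq3 (by have := hv.2.2.1; omega)).mp hv
        have hle' : s' ≤ min (pvFh m (pvC m) q.1 q.2) (pvFv m (pvC m) q.1 q.2) :=
          le_min hchk'.1 hchk'.2.1
        have hfalse := hnone s' hs' hle'
        simp only [Bool.and_eq_false_iff, decide_eq_false_iff_not] at hfalse
        rcases hfalse with h | h
        · exact h hchk'.2.2.1
        · exact h hchk'.2.2.2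
      rcases hinv with ⟨hres, hall⟩ | ⟨r, c, s0, hres, hmem, hval, hmax, hlex⟩
      · left
        refine ⟨hres, fun p hp s => ?_⟩
        rcases List.mem_append.mp hp with h | h
        · exact hall p h s
        · simp at h
          rw [h]
          intro hv
          have hcz : pvCur res = 0 := by rw [hres]; rfl
          exact hnvq s (by have := hv.2.2.1; omega) hv
      · right
        have hcz : pvCur res = s0 := by rw [hres]; exact pvCur_val _ _ _
        refine ⟨r, c, s0, hres, List.mem_append_left _ hmem, hval, ?_, ?_⟩
        · intro p hp s' hs'
          rcases List.mem_append.mp hp with h | h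
          · exact hmax p h s' hs'
          · simp at h
            rw [h]
            exact hnvq s' (by omega)
        · intro p hp hplex
          rcases List.mem_append.mp hp with h | h
          · exact hlex p h hplex
          · simp at h
            subst h
            exact absurd hplex (pvLexLt_asymm (hbefore (r, c) hmem))
  · rw [if_neg hcell]
    have hnv : ∀ s : Int, ¬ pvValid m q.1 q.2 s := pvNotValid_of_cell hcell
    rcases hinv with ⟨hres, hall⟩ | ⟨r, c, s, hres, hmem, hval, hmax, hlex⟩
    · left
      refine ⟨hres, fun p hp s => ?_⟩
      rcases List.mem_append.mp hp with h | h
      · exact hall p h s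
      · simp at h; rw [h]; exact hnv s
    · right
      refine ⟨r, c, s, hres, List.mem_append_left _ hmem, hval, ?_, ?_⟩
      · intro p hp s' hs'
        rcases List.mem_append.mp hp with h | h
        · exact hmax p h s' hs'
        · simp at h; rw [h]; exact hnv s'
      · intro p hp hplex
        rcases List.mem_append.mp hp with h | h
        · exact hlex p h hplex
        · simp at h; rw [h]; exact hnv s


lemma pvScan_inv {m : List (List Int)} (hPre : Pre_findSquare_ref m) :
    ∀ (L P : List (Int × Int)) (res : List Int),
      P ++ L = pvCells (pvR m : Int) (pvC m : Int) → pvInv m P res →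
      pvInv m (P ++ L) (L.foldl (pvStepAbs m) res) := by
  intro L
  induction L with
  | nil =>
    intro P res h hinv
    simpa using hinv
  | cons q L' ih =>
    intro P res hPL hinv
    have hcells := pvCells_pairwise ((pvR m : Int)) ((pvC m : Int))
    rw [← hPL] at hcells
    have hq_mem : q ∈ pvCells ((pvR m : Int)) ((pvC m : Int)) := by
      rw [← hPL]
      exact List.mem_append_right _ (List.mem_cons_self ..)
    have hq := pvMem_cells.mp hq_mem
    have hbefore : ∀ p ∈ P, pvLexLt p q := by
      intro p hp
      exact (List.pairwise_append.mp hcells).2.2 p hp q (List.mem_cons_self ..)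
    have hstep := pvStep hPre hq hbefore hinv
    have hrec := ih (P ++ [q]) (pvStepAbs m res q) (by simpa using hPL) hstep
    rw [List.foldl_cons]
    simpa [List.append_assoc] using hrec


lemma pvA_good {m : List (List Int)} (hm : m ≠ []) (hPre : Pre_findSquare_ref m) :
    pvGood m (findSquare_ref m) := by
  rw [pvA_eq_scan hm hPre]
  have h := pvScan_inv hPre (pvCells ((pvR m : Int)) ((pvC m : Int))) [] []
    (by simp) (Or.inl ⟨rfl, by simp⟩)
  simp only [List.nil_append] at h
  unfold pvGood
  rcases h with ⟨hres, hall⟩ | ⟨r, c, s, hres, hmem, hval, hmax, hlex⟩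
  · left
    exact ⟨hres, fun r c s hv => hall (r, c) (pvValid_mem hv) s hv⟩
  · right
    exact ⟨r, c, s, hres, hval,
      fun r' c' s' hs' hv => hmax (r', c') (pvValid_mem hv) s' hs' hv,
      fun r' c' hlex' hv => hlex (r', c') (pvValid_mem hv) hlex' hv⟩


-- ---------- B ----------

lemma pvBorder_iff {m : List (List Int)} (hPre : Pre_findSquare_ref m) {r c s : Int}
    (hr : 0 ≤ r) (hc : 0 ≤ c) (hs : 1 ≤ s)
    (hrs : r + s ≤ (pvR m : Int)) (hcs : c + s ≤ (pvC m : Int)) :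
    pvBorderOK m r c s = true ↔ pvValid m r c s := by
  unfold pvBorderOK
  simp only [Bool.and_eq_true, List.all_eq_true, PySem.List.mem_pyRange_one, beq_iff_eq]
  have hrR : r < (pvR m : Int) := by omega
  have hcC : c < (pvC m : Int) := by omega
  constructor
  · rintro ⟨⟨⟨h1, h2⟩, h3⟩, h4⟩
    refine ⟨hr, hc, hs, hrs, hcs, fun k hk0 hk1 => ?_⟩
    refine ⟨?_, ?_, ?_, ?_⟩
    · rw [← pvCell_eq hPre hr hrR (by omega) (by omega)]
      exact h1 k ⟨hk0, hk1⟩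
    · rw [← pvCell_eq hPre (by omega) (by omega) (by omega) (by omega)]
      exact h2 k ⟨hk0, hk1⟩
    · rw [← pvCell_eq hPre (by omega) (by omega) hc (by omega)]
      exact h3 k ⟨hk0, hk1⟩
    · rw [← pvCell_eq hPre (by omega) (by omega) (by omega) (by omega)]
      exact h4 k ⟨hk0, hk1⟩
  · rintro ⟨-, -, -, -, -, hedge⟩
    refine ⟨⟨⟨fun k hk => ?_, fun k hk => ?_⟩, fun k hk => ?_⟩, fun k hk => ?_⟩
    · rw [pvCell_eq hPre hr hrR (by omega) (by omega)]
      exact (hedge k hk.1 hk.2).1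
    · rw [pvCell_eq hPre (by omega) (by omega) (by omega) (by omega)]
      exact (hedge k hk.1 hk.2).2.1
    · rw [pvCell_eq hPre (by omega) (by omega) hc (by omega)]
      exact (hedge k hk.1 hk.2).2.2.1
    · rw [pvCell_eq hPre (by omega) (by omega) (by omega) (by omega)]
      exact (hedge k hk.1 hk.2).2.2.2


lemma pvB_good {m : List (List Int)} (hm : m ≠ []) (hPre : Pre_findSquare_ref m) :
    pvGood m (findSquare_ref_alt m) := by
  have hVb : ∀ {r c s : Int}, pvValid m r c s →
      0 ≤ r ∧ 0 ≤ c ∧ 1 ≤ s ∧ r + s ≤ (pvR m : Int) ∧ c + s ≤ (pvC m : Int) ∧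
      s ≤ min ((pvR m : Int)) ((pvC m : Int)) := by
    intro r c s hv
    obtain ⟨h1, h2, h3, h4, h5⟩ := pvValid_bounds hv
    exact ⟨h1, h2, h3, h4, h5, by omega⟩
  unfold findSquare_ref_alt
  rw [if_neg hm]
  rw [show ((PySem.List.pyGetD m 0 []).length : Int) = ((pvC m : Int)) from by rw [pvHead0 hm]; rfl]
  rw [show ((m.length : Int)) = ((pvR m : Int)) from rfl]
  cases hres : (PySem.List.pyRange (min ((pvR m : Int)) ((pvC m : Int))) 0 (-1)).findSome?
      (fun s => (PySem.List.pyRange 0 ((pvR m : Int) - s + 1) 1).findSome? (fun r =>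
        ((PySem.List.pyRange 0 ((pvC m : Int) - s + 1) 1).find? (fun c => pvBorderOK m r c s)).map
          (fun c => [r, c, s]))) with
  | none =>
    left
    refine ⟨rfl, fun r c s hv => ?_⟩
    obtain ⟨h1, h2, h3, h4, h5, h6⟩ := hVb hv
    have hsmem := List.findSome?_eq_none_iff.mp hres s (pvMem_pyRange_neg_one.mpr ⟨by omega, h6⟩)
    have hrmem := List.findSome?_eq_none_iff.mp hsmem r (PySem.List.mem_pyRange_one.mpr ⟨h1, by omega⟩)
    rw [Option.map_eq_none_iff] at hrmem
    have := List.find?_eq_none.mp hrmem c (PySem.List.mem_pyRange_one.mpr ⟨h2, by omega⟩)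
    exact this ((pvBorder_iff hPre h1 h2 h3 h4 h5).mpr hv)
  | some v =>
    obtain ⟨s, hs0, hsmin, hfs, hsnone⟩ := pvFindSome_desc_some hres
    obtain ⟨r, hr0, hrlt, hfr, hrnone⟩ := pvFindSome_asc_some hfs
    rw [Option.map_eq_some_iff] at hfr
    obtain ⟨c, hfc, hveq⟩ := hfr
    obtain ⟨hc0, hclt, hcpred, hcnone⟩ := pvFind_asc_some hfc
    right
    refine ⟨r, c, s, hveq.symm, (pvBorder_iff hPre hr0 hc0 (by omega) (by omega) (by omega)).mp hcpred,
      ?_, ?_⟩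
    · intro r' c' s' hs' hv
      obtain ⟨h1, h2, h3, h4, h5, h6⟩ := hVb hv
      have hnone := hsnone s' hs' h6
      have hrmem := List.findSome?_eq_none_iff.mp hnone r' (PySem.List.mem_pyRange_one.mpr ⟨h1, by omega⟩)
      rw [Option.map_eq_none_iff] at hrmem
      have := List.find?_eq_none.mp hrmem c' (PySem.List.mem_pyRange_one.mpr ⟨h2, by omega⟩)
      exact this ((pvBorder_iff hPre h1 h2 h3 h4 h5).mpr hv)
    · intro r' c' hlex hv
      obtain ⟨h1, h2, h3, h4, h5, h6⟩ := hVb hv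
      rcases hlex with hlt | ⟨heq, hlt⟩
      · have hnone := hrnone r' h1 hlt
        rw [Option.map_eq_none_iff] at hnone
        have := List.find?_eq_none.mp hnone c' (PySem.List.mem_pyRange_one.mpr ⟨h2, by omega⟩)
        exact this ((pvBorder_iff hPre h1 h2 h3 h4 h5).mpr hv)
      · subst heq
        have hfalse := hcnone c' h2 hlt
        have htrue := (pvBorder_iff hPre h1 h2 h3 h4 h5).mpr hv
        rw [htrue] at hfalse
        simp at hfalse


lemma pvGood_unique {m : List (List Int)} {o1 o2 : List Int}
    (h1 : pvGood m o1) (h2 : pvGood m o2) : o1 = o2 := by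
  rcases h1 with ⟨e1, n1⟩ | ⟨r1, c1, s1, e1, v1, m1, l1⟩
  · rcases h2 with ⟨e2, n2⟩ | ⟨r2, c2, s2, e2, v2, m2, l2⟩
    · rw [e1, e2]
    · exact absurd v2 (n1 _ _ _)
  · rcases h2 with ⟨e2, n2⟩ | ⟨r2, c2, s2, e2, v2, m2, l2⟩
    · exact absurd v1 (n2 _ _ _)
    · have hs : s1 = s2 := by
        by_contra hne
        rcases lt_or_gt_of_ne hne with h | h
        · exact m1 r2 c2 s2 h v2
        · exact m2 r1 c1 s1 h v1
      subst hs
      have hrc : r1 = r2 ∧ c1 = c2 := by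
        by_cases hl : pvLexLt (r1, c1) (r2, c2)
        · exact absurd v1 (l2 r1 c1 hl)
        · by_cases hl' : pvLexLt (r2, c2) (r1, c1)
          · exact absurd v2 (l1 r2 c2 hl')
          · unfold pvLexLt at hl hl'
            simp only at hl hl'
            omega
      rw [e1, e2, hrc.1, hrc.2]


-- ===== VERDICT (by name: the statement is the Claim_ definition above) =====
theorem findSquare_ref_spec : Claim_equal_findSquare_ref := by
  intro m hDom hPre
  unfold Spec_findSquare_ref
  by_cases hm : m = []
  · subst hm; rfl
  · exact pvGood_unique (pvA_good hm hPre) (pvB_good hm hPre)
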